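-- pv_equiv track=rewrite | github.com/SUMORAN/Bert-CNN-Capsule | util.py | get_contained_keywords
-- ===== SOURCE A (Python) =====
-- def get_contained_keywords(review, keywords, neg_words=None):
--     contained_keywords = []
--     words = review.split()
--     if neg_words is None:
--         neg_words = []
--
--     for word in words:
--         if word in keywords and word not in contained_keywords:  # 保证该词在关键词中
--             contained_keywords.append(word)
--     for word in words:
--         if word in neg_words and word not in contained_keywords:  # 保证否定词在LDA表示中
--             contained_keywords.append(word)
--     return contained_keywords
-- ===== SOURCE B (Python) =====
-- def get_contained_keywords(review, keywords, neg_words=None):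
--     if neg_words is None:
--         neg_words = []
--     kw = []
--     neg = []
--     for word in review.split():
--         if word in keywords:
--             if word not in kw:
--                 kw.append(word)
--         elif word in neg_words and word not in neg:
--             neg.append(word)
--     return kw + neg
-- ===== Notes on version B (the rewrite author's own statement) =====
-- stated objective: alternative
-- what changed: Replaces A's two sequential passes over the words (keywords pass, then negation-word pass checked against the combined accumulator) with a single pass maintaining two separate deduplicated lists kw and neg, returned as kw + neg.
import Mathlib
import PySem

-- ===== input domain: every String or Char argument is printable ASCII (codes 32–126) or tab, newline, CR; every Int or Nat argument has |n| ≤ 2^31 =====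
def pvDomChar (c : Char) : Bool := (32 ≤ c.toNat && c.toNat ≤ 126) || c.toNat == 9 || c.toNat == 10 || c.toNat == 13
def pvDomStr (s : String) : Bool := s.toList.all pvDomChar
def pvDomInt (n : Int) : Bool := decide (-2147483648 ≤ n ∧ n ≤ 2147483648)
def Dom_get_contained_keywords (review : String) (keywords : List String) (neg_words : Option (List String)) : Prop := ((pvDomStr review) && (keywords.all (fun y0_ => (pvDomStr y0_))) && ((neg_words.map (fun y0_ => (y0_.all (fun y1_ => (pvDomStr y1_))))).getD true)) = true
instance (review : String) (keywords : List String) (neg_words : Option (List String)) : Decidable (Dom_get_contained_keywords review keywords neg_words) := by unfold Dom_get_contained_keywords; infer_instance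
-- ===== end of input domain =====

-- B replaces A's two sequential passes over the words with one pass keeping two
-- separate deduplicated accumulators (keywords, then negation words), returned
-- concatenated; objective: alternative decomposition, same asymptotic cost.

-- ===== PORT A =====
-- the body of both of A's loops: append word if it is in the list `l` and not yet collected
def stepA (l : List String) (acc : List String) (w : String) : List String :=
  if l.contains w && !acc.contains w then acc ++ [w] else acc

def get_contained_keywords (review : String) (keywords : List String) (neg_words : Option (List String)) : List String :=
  let words := PySem.Str.split₀ review
  let negW := neg_words.getD []
  let ck := words.foldl (stepA keywords) []
  words.foldl (stepA negW) ck

-- ===== PORT B =====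
-- B's single-pass loop body over the pair (kw, neg)
def stepB (keywords negW : List String) (p : List String × List String) (w : String) : List String × List String :=
  if keywords.contains w then
    (if p.1.contains w then p else (p.1 ++ [w], p.2))
  else if negW.contains w && !p.2.contains w then (p.1, p.2 ++ [w]) else p

def get_contained_keywords_alt (review : String) (keywords : List String) (neg_words : Option (List String)) : List String :=
  let negW := neg_words.getD []
  let st := (PySem.Str.split₀ review).foldl (stepB keywords negW) ([], [])
  st.1 ++ st.2

-- ===== PRECONDITION & SPEC =====
def Spec_get_contained_keywords (review : String) (keywords : List String) (neg_words : Option (List String)) (out : List String) : Prop := out = get_contained_keywords_alt review keywords neg_words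
instance (review : String) (keywords : List String) (neg_words : Option (List String)) (out : List String) : Decidable (Spec_get_contained_keywords review keywords neg_words out) := by unfold Spec_get_contained_keywords; infer_instance

-- ===== CLAIM (what is proved, stated in full; the proofs are below) =====
def Claim_equal_get_contained_keywords : Prop := ∀ (review : String) (keywords : List String) (neg_words : Option (List String)), Dom_get_contained_keywords review keywords neg_words → Spec_get_contained_keywords review keywords neg_words (get_contained_keywords review keywords neg_words)

-- ===== LEMMAS AND PROOFS =====

-- the kw component of one B step is one step of A's first loop
theorem stepB_fst (K N : List String) (p : List String × List String) (w : String) :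
    (stepB K N p w).1 = stepA K p.1 w := by
  by_cases hK : w ∈ K <;> by_cases h1 : w ∈ p.1 <;> by_cases h2 : w ∈ N ∧ w ∉ p.2 <;>
    simp [stepB, stepA, hK, h1, h2]

-- the neg component of one B step does not depend on the kw component
theorem stepB_snd (K N : List String) (kw kw' neg : List String) (w : String) :
    (stepB K N (kw, neg) w).2 = (stepB K N (kw', neg) w).2 := by
  by_cases hK : w ∈ K <;> by_cases h1 : w ∈ kw <;> by_cases h1' : w ∈ kw' <;>
    by_cases h2 : w ∈ N ∧ w ∉ neg <;> simp [stepB, hK, h1, h1', h2]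

-- the kw component of B's fold evolves exactly like A's first loop
theorem fst_foldl_stepB (K N : List String) :
    ∀ (ws : List String) (kw neg : List String),
      (ws.foldl (stepB K N) (kw, neg)).1 = ws.foldl (stepA K) kw := by
  intro ws
  induction ws with
  | nil => intro kw neg; rfl
  | cons w ws ih =>
    intro kw neg
    simp only [List.foldl_cons]
    rw [show stepB K N (kw, neg) w = (stepA K kw w, (stepB K N (kw, neg) w).2) from
          Prod.ext_iff.mpr ⟨stepB_fst K N (kw, neg) w, rfl⟩]
    exact ih _ _

-- the neg component of B's fold does not depend on the kw component
theorem snd_foldl_stepB (K N : List String) :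
    ∀ (ws : List String) (kw kw' neg : List String),
      (ws.foldl (stepB K N) (kw, neg)).2 = (ws.foldl (stepB K N) (kw', neg)).2 := by
  intro ws
  induction ws with
  | nil => intro kw kw' neg; rfl
  | cons w ws ih =>
    intro kw kw' neg
    simp only [List.foldl_cons]
    rw [show stepB K N (kw, neg) w = ((stepB K N (kw, neg) w).1, (stepB K N (kw', neg) w).2) from
          Prod.ext_iff.mpr ⟨rfl, stepB_snd K N kw kw' neg w⟩,
        show stepB K N (kw', neg) w = ((stepB K N (kw', neg) w).1, (stepB K N (kw', neg) w).2) from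
          rfl]
    exact ih _ _ _

-- A's first loop only appends members of K
theorem foldl_stepA_subset (K : List String) :
    ∀ (ws : List String) (kw : List String),
      (∀ x ∈ kw, x ∈ K) → ∀ x ∈ ws.foldl (stepA K) kw, x ∈ K := by
  intro ws
  induction ws with
  | nil => intro kw h; exact h
  | cons w ws ih =>
    intro kw h
    simp only [List.foldl_cons]
    refine ih _ ?_
    intro x hx
    by_cases hc : w ∈ K ∧ w ∉ kw <;> simp [stepA, hc] at hx
    · rcases hx with hx | hx
      · exact h x hx
      · subst hx; exact hc.1
    · exact h x hx

-- membership in the accumulator is preserved by A's loop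
theorem foldl_stepA_mono (K : List String) :
    ∀ (ws : List String) (kw : List String) (x : String),
      x ∈ kw → x ∈ ws.foldl (stepA K) kw := by
  intro ws
  induction ws with
  | nil => intro kw x h; exact h
  | cons w ws ih =>
    intro kw x h
    simp only [List.foldl_cons]
    apply ih
    by_cases hc : w ∈ K ∧ w ∉ kw <;> simp [stepA, hc]
    · exact Or.inl h
    · exact h

-- after A's first loop, every word of ws that is in K is collected
theorem foldl_stepA_sat (K : List String) :
    ∀ (ws : List String) (kw : List String) (w : String),
      w ∈ ws → w ∈ K → w ∈ ws.foldl (stepA K) kw := by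
  intro ws
  induction ws with
  | nil => intro kw w h; exact absurd h (List.not_mem_nil)
  | cons v ws ih =>
    intro kw w hmem hK
    rcases List.mem_cons.mp hmem with h | h
    · subst h
      simp only [List.foldl_cons]
      apply foldl_stepA_mono
      by_cases h1 : w ∈ kw <;> simp [stepA, h1, hK]
    · exact ih _ w h hK

-- main invariant: a saturated kw splits A's second loop into kw ++ B's neg accumulator
theorem main_inv (K N : List String) :
    ∀ (ws : List String) (kw neg : List String),
      (∀ x ∈ kw, x ∈ K) →
      (∀ w ∈ ws, w ∈ K → w ∈ kw) →
      ws.foldl (stepA N) (kw ++ neg) = kw ++ (ws.foldl (stepB K N) (kw, neg)).2 := by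
  intro ws
  induction ws with
  | nil => intro kw neg _ _; rfl
  | cons w ws ih =>
    intro kw neg hsub hsat
    have hsat' : ∀ v ∈ ws, v ∈ K → v ∈ kw :=
      fun v hv => hsat v (List.mem_cons_of_mem _ hv)
    simp only [List.foldl_cons]
    by_cases hK : w ∈ K
    · have hkw : w ∈ kw := hsat w List.mem_cons_self hK
      rw [show stepA N (kw ++ neg) w = kw ++ neg by simp [stepA, hkw],
          show stepB K N (kw, neg) w = (kw, neg) by simp [stepB, hK, hkw]]
      exact ih kw neg hsub hsat'
    · have hkw : w ∉ kw := fun h => hK (hsub w h)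
      by_cases hN : w ∈ N
      · by_cases hneg : w ∈ neg
        · rw [show stepA N (kw ++ neg) w = kw ++ neg by simp [stepA, hneg],
              show stepB K N (kw, neg) w = (kw, neg) by simp [stepB, hK, hneg]]
          exact ih kw neg hsub hsat'
        · rw [show stepA N (kw ++ neg) w = kw ++ (neg ++ [w]) by
                simp [stepA, hN, hkw, hneg],
              show stepB K N (kw, neg) w = (kw, neg ++ [w]) by
                simp [stepB, hK, hN, hneg]]
          exact ih kw (neg ++ [w]) hsub hsat'
      · rw [show stepA N (kw ++ neg) w = kw ++ neg by simp [stepA, hN],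
            show stepB K N (kw, neg) w = (kw, neg) by simp [stepB, hK, hN]]
        exact ih kw neg hsub hsat'

-- ===== VERDICT (by name: the statement is the Claim_ definition above) =====
theorem get_contained_keywords_spec : Claim_equal_get_contained_keywords := by
  intro review keywords neg_words _
  unfold Spec_get_contained_keywords get_contained_keywords get_contained_keywords_alt
  simp only []
  set ws := PySem.Str.split₀ review with hws
  set N := neg_words.getD [] with hN
  set ck := ws.foldl (stepA keywords) [] with hck
  have hsub : ∀ x ∈ ck, x ∈ keywords :=
    foldl_stepA_subset keywords ws [] (by intro x h; simp at h)
  have hsat : ∀ w ∈ ws, w ∈ keywords → w ∈ ck :=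
    fun w hw hK => foldl_stepA_sat keywords ws [] w hw hK
  have h1 := main_inv keywords N ws ck [] hsub hsat
  have h2 := fst_foldl_stepB keywords N ws [] []
  rw [← hck] at h2
  have h3 := snd_foldl_stepB keywords N ws [] ck []
  simp only [List.append_nil] at h1
  rw [h1, h3, h2]
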